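-- pv_equiv track=rewrite | github.com/ahnsoheee/Algorithm | Programmers/2020_KAKAO_BLIND_RECRUITMENT/괄호 변환.py | solution
-- ===== SOURCE A (Python) =====
-- def isBalanced(u):
--     stack = []
--     for i in range(len(u)):
--         if u[i] == '(':
--             stack.append(u[i])
--         else:
--             if len(stack) == 0: return False
--             stack.pop()
--
--     return True
--
-- def reverse(v):
--     res = ''
--     for i in range(len(v)):
--         if v[i] == '(':
--             res += ')'
--         else:
--             res += '('
--
--     return res
--
-- def solution(p):
--     answer = ''
--
--     if p == '': return p
--
--     u, v = '', ''
--     cnt = 0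
--
--     for i in range(len(p)):
--         if p[i] == '(':
--             cnt += 1
--         else:
--             cnt -= 1
--         if cnt == 0:
--             u = p[:i+1]
--             v = p[i+1:]
--             break
--
--     if isBalanced(u):
--         return u + solution(v)
--     else:
--         return '(' + solution(v) + ')' + reverse(u[1:-1])
-- ===== SOURCE B (Python) =====
-- def solution(p):
--     pre = []
--     suf = []
--     while p:
--         cnt = 0
--         bal = True
--         j = 0
--         for i, ch in enumerate(p):
--             cnt += 1 if ch == '(' else -1
--             if cnt < 0:
--                 bal = False
--             if cnt == 0:
--                 j = i + 1
--                 break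
--         if j == 0:
--             break  # no top-level block closes; remaining input contributes nothing (as in A)
--         u, p = p[:j], p[j:]
--         if bal:
--             pre.append(u)
--         else:
--             pre.append('(')
--             suf.append(')' + ''.join(')' if c == '(' else '(' for c in u[1:-1]))
--     return ''.join(pre) + ''.join(reversed(suf))
-- ===== Notes on version B (the rewrite author's own statement) =====
-- stated objective: alternative
-- what changed: Replaces A's recursion with a separate isBalanced pass per block by a single iterative loop that detects each top-level block and its balancedness in one scan, collecting prefix pieces and deferred suffix pieces in lists joined once at the end.
import Mathlib
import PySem

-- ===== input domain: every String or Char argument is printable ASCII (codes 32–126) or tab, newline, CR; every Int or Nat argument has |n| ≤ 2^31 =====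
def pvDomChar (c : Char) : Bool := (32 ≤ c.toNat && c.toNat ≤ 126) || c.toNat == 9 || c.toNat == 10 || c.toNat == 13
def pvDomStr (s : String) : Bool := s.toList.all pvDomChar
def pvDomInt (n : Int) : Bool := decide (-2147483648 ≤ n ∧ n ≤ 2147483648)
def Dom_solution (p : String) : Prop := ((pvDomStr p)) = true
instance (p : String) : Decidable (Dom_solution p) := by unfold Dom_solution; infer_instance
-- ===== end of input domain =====

-- B replaces A's recursive splitting with a separate isBalanced pass per block by one
-- iterative loop that finds each top-level block and its balancedness in a single
-- scan, collecting prefix/suffix pieces joined at the end.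

-- ===== PORT A =====

-- A: isBalanced(u) with its explicit stack
def isBalA : List Char → List Char → Bool
  | [], _ => true
  | c :: rest, stack =>
    if c = '(' then isBalA rest (c :: stack)
    else
      match stack with
      | [] => false
      | _ :: s => isBalA rest s

-- A: reverse(v), building res character by character
def revA : List Char → List Char
  | [] => []
  | c :: rest => (if c = '(' then ')' else '(') :: revA rest

-- A: the for-loop finding the first index where cnt == 0; acc holds p[:i] reversed.
-- Returns (u, v) = (p[:i+1], p[i+1:]); ([], []) if the loop never breaks.
def splitA : List Char → Int → List Char → List Char × List Char
  | [], _, _ => ([], [])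
  | c :: rest, cnt, acc =>
    let cnt' := if c = '(' then cnt + 1 else cnt - 1
    if cnt' = 0 then ((c :: acc).reverse, rest)
    else splitA rest cnt' (c :: acc)

theorem splitA_snd_length : ∀ (l : List Char) (cnt : Int) (acc : List Char),
    (splitA l cnt acc).2.length ≤ l.length - 1 := by
  intro l
  induction l with
  | nil => intro cnt acc; simp [splitA]
  | cons c rest ih =>
    intro cnt acc
    simp only [splitA]
    have h1 := ih (cnt + 1) (c :: acc)
    have h2 := ih (cnt - 1) (c :: acc)
    split <;> split <;> simp only [List.length_cons] <;> omega

def solutionL (p : List Char) : List Char :=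
  if h : p = [] then []
  else
    let uv := splitA p 0 []
    have hlt : uv.2.length < p.length := by
      have h1 : uv.2.length ≤ p.length - 1 := splitA_snd_length p 0 []
      have hp : 0 < p.length := List.length_pos_iff.mpr h
      omega
    if isBalA uv.1 [] then uv.1 ++ solutionL uv.2
    else '(' :: (solutionL uv.2 ++ ')' :: revA ((uv.1.drop 1).dropLast))
termination_by p.length

def solution (p : String) : String := String.ofList (solutionL p.toList)

-- ===== PORT B =====

-- B: the inner for-loop: one scan finding the first top-level block u and whether it
-- is balanced (cnt never went negative); acc holds the scanned chars reversed.
-- none = the loop never breaks (j == 0 in Source B: no top-level block closes).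
def scanB : List Char → Int → Bool → List Char → Option (List Char × List Char × Bool)
  | [], _, _, _ => none
  | c :: rest, cnt, bal, acc =>
    let cnt' := if c = '(' then cnt + 1 else cnt - 1
    let bal' := if cnt' < 0 then false else bal
    if cnt' = 0 then some ((c :: acc).reverse, rest, bal')
    else scanB rest cnt' bal' (c :: acc)

-- B: flip each bracket of u[1:-1] (the join of the genexp in Source B)
def flipB (l : List Char) : List Char := l.map (fun c => if c = '(' then ')' else '(')

theorem scanB_snd_length : ∀ (l : List Char) (cnt : Int) (bal : Bool) (acc u v : List Char)
    (b : Bool), scanB l cnt bal acc = some (u, v, b) → v.length < l.length := by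
  intro l
  induction l with
  | nil => intro _ _ _ _ _ _ h; simp [scanB] at h
  | cons c rest ih =>
    intro cnt bal acc u v b h
    by_cases hc : c = '(' <;>
      simp only [scanB, if_pos, if_neg, hc, if_true, if_false, ite_true, ite_false] at h <;>
      split at h
    · simp only [Option.some.injEq, Prod.mk.injEq] at h
      obtain ⟨_, h2, _⟩ := h
      subst h2; simp
    · have := ih _ _ _ _ _ _ h
      simp only [List.length_cons]; omega
    · simp only [Option.some.injEq, Prod.mk.injEq] at h
      obtain ⟨_, h2, _⟩ := h
      subst h2; simp
    · have := ih _ _ _ _ _ _ h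
      simp only [List.length_cons]; omega

-- B: the while loop; pre/suf are the two Python lists, kept reversed (append = cons).
def solutionAltGo (p : List Char) (pre suf : List (List Char)) : List Char :=
  match hs : scanB p 0 true [] with
  | none => pre.reverse.flatten ++ suf.flatten
  | some (u, v, bal) =>
    have hlt : v.length < p.length := scanB_snd_length p 0 true [] u v bal hs
    if bal then solutionAltGo v (u :: pre) suf
    else solutionAltGo v (['('] :: pre) ((')' :: flipB ((u.drop 1).dropLast)) :: suf)
termination_by p.length

def solution_alt (p : String) : String := String.ofList (solutionAltGo p.toList [] [])

-- ===== PRECONDITION & SPEC =====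
def Spec_solution (p : String) (out : String) : Prop := out = solution_alt p
instance (p : String) (out : String) : Decidable (Spec_solution p out) := by unfold Spec_solution; infer_instance

-- ===== CLAIM (what is proved, stated in full; the proofs are below) =====
def Claim_equal_solution : Prop := ∀ (p : String), Dom_solution p → Spec_solution p (solution p)

-- ===== LEMMAS AND PROOFS =====

-- a some-result of scanB always extends acc.reverse by at least one char
theorem scanB_some_shape : ∀ (l : List Char) (cnt : Int) (bal : Bool) (a u v : List Char)
    (b : Bool), scanB l cnt bal a = some (u, v, b) → ∃ t, u = a.reverse ++ t ∧ t ≠ [] := by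
  intro l
  induction l with
  | nil => intro _ _ _ _ _ _ h; simp [scanB] at h
  | cons c rest ih =>
    intro cnt bal a u v b h
    by_cases hc : c = '(' <;>
      simp only [scanB, hc, if_true, if_false, ite_true, ite_false] at h <;>
      split at h
    · simp only [Option.some.injEq, Prod.mk.injEq] at h
      exact ⟨[c], by simp [hc, ← h.1], by simp⟩
    · obtain ⟨t, ht, htne⟩ := ih _ _ _ _ _ _ h
      refine ⟨c :: t, ?_, by simp⟩
      simp at ht; simp [hc, ht]
    · simp only [Option.some.injEq, Prod.mk.injEq] at h
      exact ⟨[c], by simp [hc, ← h.1], by simp⟩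
    · obtain ⟨t, ht, htne⟩ := ih _ _ _ _ _ _ h
      refine ⟨c :: t, ?_, by simp⟩
      simp at ht; simp [ht]

-- once bal is false it stays false, and scanB/splitA find the same split
theorem scanB_false : ∀ (l : List Char) (cnt : Int) (acc : List Char),
    (scanB l cnt false acc = none → splitA l cnt acc = ([], [])) ∧
    (∀ u v b, scanB l cnt false acc = some (u, v, b) →
      splitA l cnt acc = (u, v) ∧ b = false) := by
  intro l
  induction l with
  | nil =>
    intro cnt acc
    exact ⟨fun _ => rfl, fun u v b h => by simp [scanB] at h⟩
  | cons c rest ih =>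
    intro cnt acc
    by_cases hc : c = '(' <;> constructor
    · intro h
      simp only [scanB, hc, ite_self, ite_true] at h
      simp only [splitA, hc, ite_true]
      split at h
      · exact absurd h (by simp)
      · rename_i hne
        rw [if_neg hne]
        exact (ih _ _).1 h
    · intro u v b h
      simp only [scanB, hc, ite_self, ite_true] at h
      simp only [splitA, hc, ite_true]
      split at h
      · rename_i h0
        rw [if_pos h0]
        simp only [Option.some.injEq, Prod.mk.injEq] at h
        exact ⟨by rw [h.1, h.2.1], h.2.2.symm⟩
      · rename_i hne
        rw [if_neg hne]
        exact (ih _ _).2 u v b h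
    · intro h
      simp only [scanB, hc, ite_self, ite_false] at h
      simp only [splitA, hc, ite_false]
      split at h
      · exact absurd h (by simp)
      · rename_i hne
        rw [if_neg hne]
        exact (ih _ _).1 h
    · intro u v b h
      simp only [scanB, hc, ite_self, ite_false] at h
      simp only [splitA, hc, ite_false]
      split at h
      · rename_i h0
        rw [if_pos h0]
        simp only [Option.some.injEq, Prod.mk.injEq] at h
        exact ⟨by rw [h.1, h.2.1], h.2.2.symm⟩
      · rename_i hne
        rw [if_neg hne]
        exact (ih _ _).2 u v b h

-- main invariant: with bal = true and cnt = current stack height, scanB and splitA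
-- find the same block and scanB's flag equals isBalA of the block from that stack.
theorem scanB_true : ∀ (l : List Char) (stack acc : List Char),
    (scanB l (stack.length : Int) true acc = none →
      splitA l (stack.length : Int) acc = ([], [])) ∧
    (∀ u v b, scanB l (stack.length : Int) true acc = some (u, v, b) →
      splitA l (stack.length : Int) acc = (u, v) ∧
      ∃ u', u = acc.reverse ++ u' ∧ b = isBalA u' stack) := by
  intro l
  induction l with
  | nil =>
    intro stack acc
    exact ⟨fun _ => rfl, fun u v b h => by simp [scanB] at h⟩
  | cons c rest ih =>
    intro stack acc
    by_cases hc : c = '('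
    · -- push: cnt' = stack.length + 1, never 0, never negative
      have hne0 : ¬((stack.length : Int) + 1 = 0) := by omega
      have hnlt : ¬((stack.length : Int) + 1 < 0) := by omega
      have hcast : (stack.length : Int) + 1 = ((c :: stack).length : Int) := by simp
      constructor
      · intro h
        simp only [scanB, if_pos hc, if_neg hnlt, if_neg hne0, hcast] at h
        simp only [splitA, if_pos hc, if_neg hne0, hcast]
        exact (ih (c :: stack) (c :: acc)).1 h
      · intro u v b h
        simp only [scanB, if_pos hc, if_neg hnlt, if_neg hne0, hcast] at h
        simp only [splitA, if_pos hc, if_neg hne0, hcast]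
        obtain ⟨h1, u', hu', hb⟩ := (ih (c :: stack) (c :: acc)).2 u v b h
        refine ⟨h1, c :: u', ?_, ?_⟩
        · simp at hu'; simp [hu']
        · simp [isBalA, hc, hb]
    · -- pop
      match stack with
      | [] =>
        -- underflow: cnt' = -1, bal becomes false for good
        have e1 : ((([] : List Char).length : Int)) - 1 = -1 := by simp
        have hlt : (-1 : Int) < 0 := by omega
        have hne0 : ¬((-1 : Int) = 0) := by omega
        constructor
        · intro h
          simp only [scanB, if_neg hc, e1, if_pos hlt, if_neg hne0] at h
          simp only [splitA, if_neg hc, e1, if_neg hne0]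
          exact (scanB_false rest (-1) (c :: acc)).1 h
        · intro u v b h
          simp only [scanB, if_neg hc, e1, if_pos hlt, if_neg hne0] at h
          simp only [splitA, if_neg hc, e1, if_neg hne0]
          obtain ⟨h1, hb⟩ := (scanB_false rest (-1) (c :: acc)).2 u v b h
          obtain ⟨t, ht, _⟩ := scanB_some_shape rest (-1) false (c :: acc) u v b h
          refine ⟨h1, c :: t, ?_, ?_⟩
          · simp at ht; simp [ht]
          · simp [isBalA, hc, hb]
      | d :: s =>
        have hcast : ((d :: s).length : Int) - 1 = (s.length : Int) := by
          simp [List.length_cons]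
        have hnlt : ¬((s.length : Int) < 0) := by omega
        by_cases hz : s = []
        · -- block closes exactly here
          subst hz
          have h0 : ((([] : List Char).length : Nat) : Int) = 0 := by simp
          constructor
          · intro h
            simp only [scanB, if_neg hc, hcast, h0] at h
            simp at h
          · intro u v b h
            simp only [scanB, if_neg hc, hcast, h0] at h
            simp only [lt_irrefl, if_false, eq_self_iff_true, if_true, ite_true, ite_false] at h
            simp only [Option.some.injEq, Prod.mk.injEq] at h
            obtain ⟨h1, h2, h3⟩ := h
            simp only [splitA, if_neg hc, hcast, h0]
            simp only [eq_self_iff_true, if_true, ite_true]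
            refine ⟨by rw [h1, h2], [c], by rw [← h1]; simp, ?_⟩
            simp [isBalA, hc, ← h3]
          
        · have hne0 : ¬((s.length : Int) = 0) := by
            simp only [Int.natCast_eq_zero, List.length_eq_zero_iff]
            exact hz
          constructor
          · intro h
            simp only [scanB, if_neg hc, hcast, if_neg hnlt, if_neg hne0] at h
            simp only [splitA, if_neg hc, hcast, if_neg hne0]
            exact (ih s (c :: acc)).1 h
          · intro u v b h
            simp only [scanB, if_neg hc, hcast, if_neg hnlt, if_neg hne0] at h
            simp only [splitA, if_neg hc, hcast, if_neg hne0]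
            obtain ⟨h1, u', hu', hb⟩ := (ih s (c :: acc)).2 u v b h
            refine ⟨h1, c :: u', ?_, ?_⟩
            · simp at hu'; simp [hu']
            · simp [isBalA, hc, hb]

theorem revA_eq_flipB : ∀ (l : List Char), revA l = flipB l := by
  intro l
  induction l with
  | nil => rfl
  | cons c rest ih => simp [revA, flipB, List.map] at ih ⊢; exact ih

theorem solutionAltGo_eq : ∀ (n : Nat) (p : List Char) (pre suf : List (List Char)),
    p.length ≤ n →
    solutionAltGo p pre suf = pre.reverse.flatten ++ solutionL p ++ suf.flatten := by
  intro n
  induction n with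
  | zero =>
    intro p pre suf hn
    have hp : p = [] := List.eq_nil_of_length_eq_zero (Nat.le_zero.mp hn)
    subst hp
    rw [solutionAltGo.eq_def, solutionL.eq_def]
    simp [scanB]
  | succ n ih =>
    intro p pre suf hn
    rw [solutionAltGo.eq_def]
    split
    · -- scanB p 0 true [] = none
      rename_i hs
      by_cases hp : p = []
      · subst hp; rw [solutionL.eq_def]; simp
      · have hsplit : splitA p 0 [] = ([], []) := by
          have h := (scanB_true p [] []).1
          simp only [List.length_nil, Nat.cast_zero] at h
          exact h hs
        rw [solutionL.eq_def]
        simp only [dif_neg hp, hsplit]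
        rw [solutionL.eq_def]
        simp [isBalA]
    · -- scanB p 0 true [] = some (u, v, bal)
      rename_i u v bal hs
      have hp : p ≠ [] := by intro h; subst h; simp [scanB] at hs
      have hmain := (scanB_true p [] []).2 u v bal
      simp only [List.length_nil, Nat.cast_zero] at hmain
      obtain ⟨hsplit, u', hu', hb⟩ := hmain hs
      simp only [List.reverse_nil, List.nil_append] at hu'
      subst hu'
      have hvlt : v.length < p.length := scanB_snd_length p 0 true [] u v bal hs
      have hvn : v.length ≤ n := by omega
      conv_rhs => rw [solutionL.eq_def]
      simp only [dif_neg hp, hsplit]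
      by_cases hbal : isBalA u []
      · have hbt : bal = true := by rw [hb, hbal]
        rw [if_pos hbt, if_pos hbal, ih v (u :: pre) suf hvn]
        simp
      · have hbf : bal = false := by rw [hb]; simpa using hbal
        rw [if_neg (by simp [hbf]), if_neg hbal,
          ih v (['('] :: pre) ((')' :: flipB ((u.drop 1).dropLast)) :: suf) hvn]
        simp [revA_eq_flipB]

-- ===== VERDICT (by name: the statement is the Claim_ definition above) =====
theorem solution_spec : Claim_equal_solution := by
  intro p _
  unfold Spec_solution solution solution_alt
  rw [solutionAltGo_eq p.toList.length p.toList [] [] (le_refl _)]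
  simp
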